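-- pv_equiv track=rewrite | github.com/qxz-coder/VersionSeek | ResponseProcessing/Dubbo/greedy.py | split_versions
-- ===== SOURCE A (Python) =====
-- def split_versions(version_set, version_sets_by_probe):
--
--     remaining_versions = version_set.copy()
--     new_sets = []
--
--
--     for v_set in version_sets_by_probe:
--         intersection = version_set.intersection(v_set)
--         if intersection:
--             new_sets.append(intersection)
--             remaining_versions -= intersection
--
--     if remaining_versions:
--         new_sets.append(remaining_versions)
--
--     return new_sets
-- ===== SOURCE B (Python) =====
-- def split_versions(version_set, version_sets_by_probe):
--     # Inverted loop nesting: iterate over the VERSIONS, bucketing each version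
--     # into every probe set that contains it; versions hitting no probe set go
--     # to the leftover bucket.
--     buckets = [set() for _ in version_sets_by_probe]
--     leftover = set()
--     for v in version_set:
--         hit = False
--         for bucket, probe in zip(buckets, version_sets_by_probe):
--             if v in probe:
--                 bucket.add(v)
--                 hit = True
--         if not hit:
--             leftover.add(v)
--     new_sets = [b for b in buckets if b]
--     if leftover:
--         new_sets.append(leftover)
--     return new_sets
-- ===== Notes on version B (the rewrite author's own statement) =====
-- stated objective: alternative
-- what changed: B inverts the loop nesting: instead of scanning probe sets and maintaining a shrinking remainder via set subtraction, it scans the versions once, distributing each version into a bucket per probe set that contains it and into a leftover bucket when none does.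
import Mathlib
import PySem

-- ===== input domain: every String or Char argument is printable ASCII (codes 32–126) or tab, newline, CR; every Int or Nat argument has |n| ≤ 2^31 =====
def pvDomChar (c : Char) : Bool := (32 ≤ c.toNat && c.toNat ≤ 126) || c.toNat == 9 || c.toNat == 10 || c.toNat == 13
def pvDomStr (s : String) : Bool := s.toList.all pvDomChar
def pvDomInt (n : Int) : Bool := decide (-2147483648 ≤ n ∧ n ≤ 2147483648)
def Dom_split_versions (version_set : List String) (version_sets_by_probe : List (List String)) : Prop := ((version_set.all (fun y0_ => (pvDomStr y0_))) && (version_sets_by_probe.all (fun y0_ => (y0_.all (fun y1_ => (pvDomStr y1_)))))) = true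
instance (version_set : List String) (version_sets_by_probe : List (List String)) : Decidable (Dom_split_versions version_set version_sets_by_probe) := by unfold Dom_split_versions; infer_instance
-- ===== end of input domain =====

-- B inverts the loop nesting: one pass over the versions distributing each into per-probe
-- buckets plus a leftover bucket, instead of A's scan over probe sets with a shrinking
-- remainder (objective: alternative).

-- ===== PORT A =====
def split_versions (version_set : List String) (version_sets_by_probe : List (List String)) : List (List String) :=
  let st := version_sets_by_probe.foldl
    (fun (st : PySem.Set String × List (List String)) v_set =>
      let intersection := PySem.Set.inter version_set v_set
      if intersection = [] then st
      else (PySem.Set.diff st.1 intersection, st.2 ++ [intersection]))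
    (version_set, ([] : List (List String)))
  if st.1 = [] then st.2 else st.2 ++ [st.1]

-- ===== PORT B =====
def split_versions_alt (version_set : List String) (version_sets_by_probe : List (List String)) : List (List String) :=
  let st := version_set.foldl
    (fun (st : List (List String) × List String) v =>
      let inner := (st.1.zip version_sets_by_probe).foldl
        (fun (acc : List (List String) × Bool) bp =>
          if bp.2.contains v then (acc.1 ++ [PySem.Set.add bp.1 v], true)
          else (acc.1 ++ [bp.1], acc.2))
        (([] : List (List String)), false)
      (inner.1, if inner.2 then st.2 else PySem.Set.add st.2 v))
    (version_sets_by_probe.map (fun _ => (PySem.Set.empty : List String)), (PySem.Set.empty : List String))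
  let new_sets := st.1.filter (fun b => !b.isEmpty)
  if st.2 = [] then new_sets else new_sets ++ [st.2]

-- ===== PRECONDITION & SPEC =====
-- Pre_ states the representation invariant of the Python 'set' argument: version_set, being a
-- set, holds no duplicate elements (a list with duplicates does not encode any Python set).
def Pre_split_versions (version_set : List String) (version_sets_by_probe : List (List String)) : Prop := version_set.Nodup
instance (version_set : List String) (version_sets_by_probe : List (List String)) : Decidable (Pre_split_versions version_set version_sets_by_probe) := by unfold Pre_split_versions; infer_instance
def pvWitness_split_versions : List String × List (List String) := (["1.0", "2.0"], [["1.0"], ["3.0"]])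

def Spec_split_versions (version_set : List String) (version_sets_by_probe : List (List String)) (out : List (List String)) : Prop := out = split_versions_alt version_set version_sets_by_probe
instance (version_set : List String) (version_sets_by_probe : List (List String)) (out : List (List String)) : Decidable (Spec_split_versions version_set version_sets_by_probe out) := by unfold Spec_split_versions; infer_instance

-- ===== CLAIM (what is proved, stated in full; the proofs are below) =====
def Claim_equal_split_versions : Prop := ∀ (version_set : List String) (version_sets_by_probe : List (List String)), Dom_split_versions version_set version_sets_by_probe → Pre_split_versions version_set version_sets_by_probe → Spec_split_versions version_set version_sets_by_probe (split_versions version_set version_sets_by_probe)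

-- ===== LEMMAS AND PROOFS =====

-- s - (u | t) = (s - u) - t
theorem pv_diff_union (r u s : List String) :
    PySem.Set.diff r (PySem.Set.union u s) = PySem.Set.diff (PySem.Set.diff r u) s := by
  simp only [PySem.Set.diff, List.filter_filter]
  apply List.filter_congr
  intro x _
  have : x ∈ PySem.Set.update u s ↔ x ∈ u ∨ x ∈ s := PySem.Set.mem_update u s x
  simp only [PySem.Set.union, PySem.Set.contains_eq_listContains] at *
  by_cases hu : x ∈ u <;> by_cases hs : x ∈ s <;> simp [this, hu, hs]

-- folding '-=' over the probe sets = one difference from the folded union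
theorem pv_foldl_diff_eq_diff_foldl_union (probes : List (List String)) :
    ∀ (r u : List String),
      probes.foldl (fun a b => PySem.Set.diff a b) (PySem.Set.diff r u)
        = PySem.Set.diff r (probes.foldl (fun a b => PySem.Set.union a b) u) := by
  induction probes with
  | nil => intro r u; simp
  | cons s probes ih =>
      intro r u
      simp only [List.foldl_cons]
      rw [← pv_diff_union r u s, ih]

theorem pv_diff_nil (r : List String) : PySem.Set.diff r [] = r := by
  simp [PySem.Set.diff]

-- A's loop, characterised: the remaining set is an unconditional fold of differences,
-- and the collected sets are the nonempty intersections with the ORIGINAL version_set.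
theorem pv_loopA (vs : List String) (probes : List (List String)) :
    ∀ (r : List String) (acc : List (List String)),
      (∀ x ∈ r, x ∈ vs) →
      probes.foldl
        (fun (st : PySem.Set String × List (List String)) v_set =>
          let intersection := PySem.Set.inter vs v_set
          if intersection = [] then st
          else (PySem.Set.diff st.1 intersection, st.2 ++ [intersection]))
        (r, acc)
      = (probes.foldl (fun a b => PySem.Set.diff a b) r,
         acc ++ (probes.map (fun s => PySem.Set.inter vs s)).filter (fun i => !i.isEmpty)) := by
  induction probes with
  | nil => intro r acc _; simp
  | cons s probes ih =>
      intro r acc hr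
      simp only [List.foldl_cons, List.map_cons, List.filter_cons]
      by_cases h : PySem.Set.inter vs s = []
      · have hd : PySem.Set.diff r s = r := by
          apply List.filter_eq_self.2
          intro x hx
          have hxv : x ∈ vs := hr x hx
          have : x ∉ s := by
            intro hxs
            have : x ∈ PySem.Set.inter vs s := by
              simp [PySem.Set.inter, List.mem_filter, hxv, hxs]
            simp [h] at this
          simp [this]
        rw [if_pos h, ih r acc hr, hd, h]
        simp
      · have hd : PySem.Set.diff r (PySem.Set.inter vs s) = PySem.Set.diff r s := by
          apply List.filter_congr
          intro x hx
          have hxv : x ∈ vs := hr x hx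
          by_cases hs : x ∈ s <;>
            simp [PySem.Set.inter, List.mem_filter, hxv, hs]
        have hr' : ∀ x ∈ PySem.Set.diff r s, x ∈ vs := by
          intro x hx
          exact hr x (List.mem_of_mem_filter hx)
        rw [if_neg h, ih _ _ (by simpa [hd] using hr'), hd]
        have : (!(PySem.Set.inter vs s).isEmpty) = true := by simp [h]
        simp [this]

-- membership in the folded union
theorem pv_mem_foldl_union (probes : List (List String)) :
    ∀ (u : List String) (x : String),
      x ∈ probes.foldl (fun a b => PySem.Set.union a b) u ↔ x ∈ u ∨ ∃ s ∈ probes, x ∈ s := by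
  induction probes with
  | nil => intro u x; simp
  | cons s probes ih =>
      intro u x
      simp only [List.foldl_cons]
      rw [ih]
      have := PySem.Set.mem_union u s x
      constructor
      · rintro (h | h)
        · rcases this.1 h with h' | h'
          · exact Or.inl h'
          · exact Or.inr ⟨s, by simp, h'⟩
        · rcases h with ⟨t, ht, hx⟩; exact Or.inr ⟨t, by simp [ht], hx⟩
      · rintro (h | ⟨t, ht, hx⟩)
        · exact Or.inl (this.2 (Or.inl h))
        · rcases List.mem_cons.1 ht with rfl | ht'
          · exact Or.inl (this.2 (Or.inr hx))
          · exact Or.inr ⟨t, ht', hx⟩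

-- B's inner loop over zip(buckets, probes): appends the updated buckets, flag = any hit
theorem pv_innerB (v : String) (ps : List (List String)) :
    ∀ (bs : List (List String)) (acc : List (List String)) (flag : Bool),
      bs.length = ps.length →
      (bs.zip ps).foldl
        (fun (acc : List (List String) × Bool) bp =>
          if bp.2.contains v then (acc.1 ++ [PySem.Set.add bp.1 v], true)
          else (acc.1 ++ [bp.1], acc.2))
        (acc, flag)
      = (acc ++ (bs.zip ps).map (fun bp => if bp.2.contains v then PySem.Set.add bp.1 v else bp.1),
         flag || ps.any (fun p => p.contains v)) := by
  induction ps with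
  | nil => intro bs acc flag h; simp_all
  | cons p ps ih =>
      intro bs acc flag h
      cases bs with
      | nil => simp at h
      | cons b bs =>
          simp only [List.zip_cons_cons, List.foldl_cons, List.map_cons, List.any_cons]
          by_cases hp : p.contains v = true
          · rw [if_pos hp, ih bs _ true (by simpa using h), if_pos hp]
            simp only [Prod.mk.injEq, List.append_assoc]
            have : v ∈ p := by simpa using hp
            simp [this]
          · rw [if_neg hp, ih bs _ flag (by simpa using h), if_neg hp]
            have : (decide (v ∈ p)) = false := by simpa using hp
            simp [this]

-- B's outer loop, characterised: each bucket is the filter of the processed versions by its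
-- probe set, the leftover bucket the filter of versions in no probe set.
theorem pv_loopB (ps : List (List String)) :
    ∀ (rest p : List String), (p ++ rest).Nodup →
      rest.foldl
        (fun (st : List (List String) × List String) v =>
          let inner := (st.1.zip ps).foldl
            (fun (acc : List (List String) × Bool) bp =>
              if bp.2.contains v then (acc.1 ++ [PySem.Set.add bp.1 v], true)
              else (acc.1 ++ [bp.1], acc.2))
            (([] : List (List String)), false)
          (inner.1, if inner.2 then st.2 else PySem.Set.add st.2 v))
        (ps.map (fun s => p.filter (fun x => s.contains x)),
         p.filter (fun v => !(ps.any (fun s => s.contains v))))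
      = (ps.map (fun s => (p ++ rest).filter (fun x => s.contains x)),
         (p ++ rest).filter (fun v => !(ps.any (fun s => s.contains v)))) := by
  intro rest
  induction rest with
  | nil => intro p _; simp
  | cons v rest ih =>
      intro p hnd
      have hvp : v ∉ p := by
        have hd := (List.nodup_append.1 hnd).2.2
        intro hv
        exact hd v hv v (by simp) rfl
      simp only [List.foldl_cons]
      rw [pv_innerB v ps _ [] false (by simp)]
      have hzip : (ps.map (fun s => p.filter (fun x => s.contains x))).zip ps
          = ps.map (fun s => (p.filter (fun x => s.contains x), s)) := by
        have h0 := List.zip_map' (f := fun s : List String => p.filter (fun x => s.contains x)) (g := id) (l := ps)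
        simpa using h0
      have hbuckets :
          (((ps.map (fun s => p.filter (fun x => s.contains x))).zip ps).map
            (fun bp => if bp.2.contains v then PySem.Set.add bp.1 v else bp.1))
          = ps.map (fun s => (p ++ [v]).filter (fun x => s.contains x)) := by
        rw [hzip, List.map_map]
        apply List.map_congr_left
        intro s _
        simp only [Function.comp]
        by_cases hs : s.contains v = true
        · rw [if_pos hs]
          have hvnot : v ∉ p.filter (fun x => s.contains x) := fun h => hvp (List.mem_of_mem_filter h)
          rw [PySem.Set.add_of_not_mem hvnot]
          have hv' : v ∈ s := by simpa using hs
          simp [List.filter_append, hv']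
        · rw [if_neg hs]
          have hv' : v ∉ s := by simpa using hs
          simp [List.filter_append, hv']
      have hleft :
          (if ps.any (fun p => p.contains v) then p.filter (fun v => !(ps.any (fun s => s.contains v)))
           else PySem.Set.add (p.filter (fun v => !(ps.any (fun s => s.contains v)))) v)
          = (p ++ [v]).filter (fun v => !(ps.any (fun s => s.contains v))) := by
        by_cases hv : ps.any (fun s => s.contains v) = true
        · rw [if_pos hv]
          obtain ⟨s, hs, hvs⟩ := List.any_eq_true.1 hv
          have hv' : ∃ x ∈ ps, v ∈ x := ⟨s, hs, by simpa using hvs⟩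
          simp [List.filter_append, hv']
        · rw [if_neg hv]
          have hvnot : v ∉ p.filter (fun v => !(ps.any (fun s => s.contains v))) :=
            fun h => hvp (List.mem_of_mem_filter h)
          rw [PySem.Set.add_of_not_mem hvnot]
          have h5 : (ps.any fun s => decide (v ∈ s)) = false := by
            rw [List.any_eq_false]
            intro s hs
            simp only [decide_eq_true_eq]
            intro hvs
            exact hv (List.any_eq_true.2 ⟨s, hs, by simpa using hvs⟩)
          simp [List.filter_append, h5]
      simp only [Bool.false_or]
      rw [hbuckets, hleft]
      have hnd' : ((p ++ [v]) ++ rest).Nodup := by simpa using hnd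
      have := ih (p ++ [v]) hnd'
      simpa using this

-- ===== VERDICT (by name: the statement is the Claim_ definition above) =====
theorem split_versions_spec : Claim_equal_split_versions := by
  intro vs ps _ hpre
  unfold Spec_split_versions split_versions split_versions_alt
  rw [pv_loopA vs ps vs [] (fun _ h => h)]
  have hB := pv_loopB ps vs [] (by simpa using hpre)
  simp only [List.filter_nil, List.nil_append, PySem.Set.empty] at hB ⊢
  rw [hB]
  have hrem : ps.foldl (fun a b => PySem.Set.diff a b) vs
      = vs.filter (fun v => !(ps.any (fun s => s.contains v))) := by
    have h1 := pv_foldl_diff_eq_diff_foldl_union ps vs []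
    rw [pv_diff_nil] at h1
    rw [h1]
    unfold PySem.Set.diff
    apply List.filter_congr
    intro x _
    have hm := pv_mem_foldl_union ps [] x
    simp only [List.mem_nil_iff, false_or] at hm
    by_cases hx : ∃ s ∈ ps, x ∈ s
    · have : x ∈ ps.foldl (fun a b => PySem.Set.union a b) [] := hm.2 hx
      rcases hx with ⟨s, hs, hxs⟩
      simp only [PySem.Set.contains_eq_listContains]
      have h2 : ps.any (fun s => s.contains x) = true :=
        List.any_eq_true.2 ⟨s, hs, by simpa using hxs⟩
      simp only [PySem.Set.contains_eq_listContains] at *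
      simp [this, h2]
      exact ⟨s, hs, hxs⟩
    · have h3 : x ∉ ps.foldl (fun a b => PySem.Set.union a b) [] := fun h => hx (hm.1 h)
      have h4 : ps.any (fun s => s.contains x) = false := by
        rw [List.any_eq_false]
        intro s hs
        simp only [List.contains_eq_mem, decide_eq_true_eq] at *
        exact fun hxs => hx ⟨s, hs, hxs⟩
      simp [h3, h4]
      intro t ht hxt
      exact hx ⟨t, ht, hxt⟩
  have hint : ps.map (fun s => vs.filter (fun x => s.contains x))
      = ps.map (fun s => PySem.Set.inter vs s) := by
    apply List.map_congr_left
    intro s _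
    rfl
  rw [hrem, hint]
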